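-- pv_equiv track=rewrite | github.com/alvaroybanez/jtbd-chat-dspy-v2 | app/pages/metrics.py | _filter_metrics
-- ===== SOURCE A (Python) =====
-- from typing import Dict, List, Any, Optional
--
-- def _filter_metrics(
--     metrics: List[Dict[str, Any]],
--     search_term: str,
--     selected_units: List[str]
-- ) -> List[Dict[str, Any]]:
--     """Filter metrics based on search term and selected units."""
--     filtered = metrics
--
--     # Filter by search term
--     if search_term:
--         search_lower = search_term.lower()
--         filtered = [
--             metric for metric in filtered
--             if (search_lower in metric.get("name", "").lower() or
--                 search_lower in metric.get("description", "").lower())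
--         ]
--
--     # Filter by units
--     if selected_units:
--         filtered = [
--             metric for metric in filtered
--             if metric.get("unit", "N/A") in selected_units
--         ]
--
--     return filtered
-- ===== SOURCE B (Python) =====
-- def _filter_metrics(metrics, search_term, selected_units):
--     """Index-set strategy: compute the set of indices passing each criterion
--     independently, intersect the two index sets, and rebuild the result by
--     indexing back into metrics in ascending index order."""
--     n = len(metrics)
--     if search_term:
--         sl = search_term.lower()
--         s_idx = {
--             i for i, m in enumerate(metrics)
--             if sl in m.get("name", "").lower() or sl in m.get("description", "").lower()
--         }
--     else:
--         s_idx = set(range(n))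
--     if selected_units:
--         u_idx = {i for i, m in enumerate(metrics) if m.get("unit", "N/A") in selected_units}
--     else:
--         u_idx = set(range(n))
--     return [metrics[i] for i in sorted(s_idx & u_idx)]
-- ===== Notes on version B (the rewrite author's own statement) =====
-- stated objective: alternative
-- what changed: Instead of A's chained element-level filter passes, B computes one index set per criterion over enumerate(metrics), intersects the two sets, and rebuilds the result by indexing metrics at the sorted intersection.
import Mathlib
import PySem

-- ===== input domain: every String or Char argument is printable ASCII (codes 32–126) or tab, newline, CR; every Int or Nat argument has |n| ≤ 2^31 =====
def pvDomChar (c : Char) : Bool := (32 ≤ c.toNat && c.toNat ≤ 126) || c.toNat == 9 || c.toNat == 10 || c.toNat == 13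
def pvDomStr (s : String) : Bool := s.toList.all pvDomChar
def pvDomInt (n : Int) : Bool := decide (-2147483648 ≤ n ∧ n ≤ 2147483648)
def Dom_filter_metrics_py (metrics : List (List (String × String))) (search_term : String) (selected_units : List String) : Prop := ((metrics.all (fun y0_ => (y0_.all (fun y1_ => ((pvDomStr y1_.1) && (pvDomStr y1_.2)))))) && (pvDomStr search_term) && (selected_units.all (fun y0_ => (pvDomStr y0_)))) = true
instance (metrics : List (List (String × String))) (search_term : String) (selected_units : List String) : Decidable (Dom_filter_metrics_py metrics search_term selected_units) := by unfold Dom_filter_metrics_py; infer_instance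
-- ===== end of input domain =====

-- B replaces A's chained element filters by an index-set strategy: two independent index
-- sets (one per criterion), a set intersection, and a rebuild by indexing (objective: alternative).

-- dict.get(k, dflt) on an association list: first match, else the default
def pyDictGetD (m : List (String × String)) (k : String) (dflt : String) : String :=
  ((m.lookup k).getD dflt)

-- ===== PORT A =====
def filter_metrics_py (metrics : List (List (String × String))) (search_term : String) (selected_units : List String) : List (List (String × String)) :=
  let filtered := metrics
  -- if search_term:
  let filtered :=
    if search_term.isEmpty then filtered
    else
      let search_lower := PySem.Str.lower search_term
      filtered.filter (fun metric =>
        PySem.Str.isIn search_lower (PySem.Str.lower (pyDictGetD metric "name" "")) ||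
        PySem.Str.isIn search_lower (PySem.Str.lower (pyDictGetD metric "description" "")))
  -- if selected_units:
  let filtered :=
    if selected_units.isEmpty then filtered
    else
      filtered.filter (fun metric => selected_units.contains (pyDictGetD metric "unit" "N/A"))
  filtered

-- ===== PORT B =====
-- Source B: index sets for each criterion, intersected, then "[metrics[i] for i in sorted(s_idx & u_idx)]".
-- The set comprehensions are PySem.Set.ofList of the comprehended index list; metrics[i] is
-- pyGetD with an unreachable default (every intersected index is a valid index of metrics).
def filter_metrics_py_alt (metrics : List (List (String × String))) (search_term : String) (selected_units : List String) : List (List (String × String)) :=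
  let n : Int := metrics.length
  let s_idx : PySem.Set Int :=
    if !search_term.isEmpty then
      let sl := PySem.Str.lower search_term
      PySem.Set.ofList (((PySem.List.enumerate metrics).filter (fun im =>
        PySem.Str.isIn sl (PySem.Str.lower (pyDictGetD im.2 "name" "")) ||
        PySem.Str.isIn sl (PySem.Str.lower (pyDictGetD im.2 "description" "")))).map (·.1))
    else
      PySem.Set.ofList (PySem.List.pyRange 0 n 1)
  let u_idx : PySem.Set Int :=
    if !selected_units.isEmpty then
      PySem.Set.ofList (((PySem.List.enumerate metrics).filter (fun im =>
        selected_units.contains (pyDictGetD im.2 "unit" "N/A"))).map (·.1))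
    else
      PySem.Set.ofList (PySem.List.pyRange 0 n 1)
  (PySem.List.sorted (PySem.Set.inter s_idx u_idx) (fun i => i) false).map
    (fun i => PySem.List.pyGetD metrics i [])

-- ===== PRECONDITION & SPEC =====
def Spec_filter_metrics_py (metrics : List (List (String × String))) (search_term : String) (selected_units : List String) (out : List (List (String × String))) : Prop := out = filter_metrics_py_alt metrics search_term selected_units
instance (metrics : List (List (String × String))) (search_term : String) (selected_units : List String) (out : List (List (String × String))) : Decidable (Spec_filter_metrics_py metrics search_term selected_units out) := by unfold Spec_filter_metrics_py; infer_instance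

-- ===== CLAIM (what is proved, stated in full; the proofs are below) =====
def Claim_equal_filter_metrics_py : Prop := ∀ (metrics : List (List (String × String))) (search_term : String) (selected_units : List String), Dom_filter_metrics_py metrics search_term selected_units → Spec_filter_metrics_py metrics search_term selected_units (filter_metrics_py metrics search_term selected_units)

-- ===== LEMMAS AND PROOFS =====

-- the search predicate of both programs
def pvHit (sl : String) (m : List (String × String)) : Bool :=
  PySem.Str.isIn sl (PySem.Str.lower (pyDictGetD m "name" "")) ||
  PySem.Str.isIn sl (PySem.Str.lower (pyDictGetD m "description" ""))

-- the combined per-element predicate (with A's truthiness guards folded in)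
def pvKeep (search_term : String) (selected_units : List String) (m : List (String × String)) : Bool :=
  (search_term.isEmpty || pvHit (PySem.Str.lower search_term) m) &&
  (selected_units.isEmpty || selected_units.contains (pyDictGetD m "unit" "N/A"))

-- filtering twice = filtering by the conjunction
theorem pv_filter_filter_and {α : Type} (p q : α → Bool) (l : List α) :
    (l.filter p).filter q = l.filter (fun x => p x && q x) := by
  induction l with
  | nil => rfl
  | cons x xs ih =>
    by_cases hp : p x = true <;> by_cases hq : q x = true <;> simp [hp, hq, ih]

-- A (the two conditional filter passes) equals one filter by pvKeep
theorem filter_metrics_A_eq (metrics : List (List (String × String))) (search_term : String) (selected_units : List String) :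
    filter_metrics_py metrics search_term selected_units
      = metrics.filter (pvKeep search_term selected_units) := by
  unfold filter_metrics_py
  cases h1 : search_term.isEmpty <;> cases h2 : selected_units.isEmpty <;>
    simp only [Bool.false_eq_true, if_false, if_true]
  · rw [pv_filter_filter_and]
    exact List.filter_congr (fun x _ => by simp [pvKeep, pvHit, h1, h2])
  · exact List.filter_congr (fun x _ => by simp [pvKeep, pvHit, h1, h2])
  · exact List.filter_congr (fun x _ => by simp [pvKeep, pvHit, h1, h2])
  · exact (List.filter_eq_self.mpr (fun x _ => by simp [pvKeep, pvHit, h1, h2])).symm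

-- the index list of the elements satisfying F, in position order
def pvIdx {α : Type} (xs : List α) (F : α → Bool) : List Int :=
  ((PySem.List.enumerate xs 0).filter (fun im => F im.2)).map (·.1)

-- an enumerate pair's index is ≥ the start and indexes back to its element
theorem pv_enum_spec {α : Type} (d : α) : ∀ (xs : List α) (s : Int) (im : Int × α),
    im ∈ PySem.List.enumerate xs s → s ≤ im.1 ∧ PySem.List.pyGetD xs (im.1 - s) d = im.2 := by
  intro xs
  induction xs with
  | nil => intro s im h; simp [PySem.List.enumerate] at h
  | cons x xs ih =>
    intro s im h
    rw [PySem.List.enumerate_cons] at h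
    rcases List.mem_cons.mp h with h | h
    · subst h
      refine ⟨le_refl _, ?_⟩
      simp [PySem.List.pyGetD_zero_cons]
    · obtain ⟨h1, h2⟩ := ih (s + 1) im h
      refine ⟨by omega, ?_⟩
      rw [PySem.List.pyGetD_of_nonneg _ _ (by omega)] at h2 ⊢
      have ht : (im.1 - s).toNat = (im.1 - (s + 1)).toNat + 1 := by omega
      rw [ht]
      simpa using h2

-- projecting the elements back out of a filtered enumerate is a plain filter
theorem pv_map_snd_filter {α : Type} (H : α → Bool) : ∀ (xs : List α) (s : Int),
    ((PySem.List.enumerate xs s).filter (fun im => H im.2)).map (·.2) = xs.filter H := by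
  intro xs
  induction xs with
  | nil => intro s; simp [PySem.List.enumerate]
  | cons x xs ih =>
    intro s
    rw [PySem.List.enumerate_cons]
    by_cases h : H x = true <;> simp [h, ih]

theorem pvIdx_sublist_range {α : Type} (xs : List α) (F : α → Bool) :
    List.Sublist (pvIdx xs F) (PySem.List.pyRange 0 (xs.length : Int) 1) := by
  have h : List.Sublist (pvIdx xs F) ((PySem.List.enumerate xs 0).map (·.1)) :=
    List.Sublist.map _ List.filter_sublist
  rwa [PySem.List.map_fst_enumerate, zero_add] at h

theorem pvIdx_nodup {α : Type} (xs : List α) (F : α → Bool) : (pvIdx xs F).Nodup :=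
  (pvIdx_sublist_range xs F).nodup (PySem.List.nodup_pyRange_one _ _)

theorem pvIdx_true {α : Type} (xs : List α) :
    pvIdx xs (fun _ => true) = PySem.List.pyRange 0 (xs.length : Int) 1 := by
  simp [pvIdx, PySem.List.map_fst_enumerate]

-- membership of an enumerate pair's index in an index set decides the predicate on its element
theorem pv_mem_idx {α : Type} (xs : List α) (G : α → Bool) {im : Int × α}
    (h : im ∈ PySem.List.enumerate xs 0) :
    (pvIdx xs G).contains im.1 = G im.2 := by
  by_cases hg : G im.2 = true
  · have hm : im.1 ∈ pvIdx xs G :=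
      List.mem_map.mpr ⟨im, List.mem_filter.mpr ⟨h, by simp [hg]⟩, rfl⟩
    simp [hg, hm]
  · simp only [Bool.eq_false_iff.mpr hg]
    by_contra hc
    rw [Bool.not_eq_false, List.contains_eq_mem, decide_eq_true_iff, pvIdx] at hc
    obtain ⟨jm, hjm, hfst⟩ := List.mem_map.mp hc
    obtain ⟨hje, hjG⟩ := List.mem_filter.mp hjm
    have e1 := (pv_enum_spec im.2 xs 0 jm hje).2
    have e2 := (pv_enum_spec im.2 xs 0 im h).2
    rw [sub_zero] at e1 e2
    rw [hfst, e2] at e1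
    rw [← e1] at hjG
    exact hg hjG

-- the core of B: intersect the two index sets, index back in, and you have filtered by the conjunction
theorem pv_core {α : Type} (xs : List α) (d : α) (F G : α → Bool) :
    ((pvIdx xs F).filter (fun i => (pvIdx xs G).contains i)).map
        (fun i => PySem.List.pyGetD xs i d)
      = xs.filter (fun m => F m && G m) := by
  rw [show pvIdx xs F = ((PySem.List.enumerate xs 0).filter (fun im => F im.2)).map (·.1) from rfl]
  rw [List.filter_map, List.map_map, pv_filter_filter_and]
  rw [List.filter_congr (l := PySem.List.enumerate xs 0)
    (q := fun im => F im.2 && G im.2)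
    (fun im him => by
      simp only [Function.comp_apply, pv_mem_idx xs G him])]
  rw [← pv_map_snd_filter (fun m => F m && G m) xs 0]
  refine List.map_congr_left (fun im him => ?_)
  have hmem : im ∈ PySem.List.enumerate xs 0 := (List.mem_filter.mp him).1
  have e := (pv_enum_spec d xs 0 im hmem).2
  rw [sub_zero] at e
  simpa using e

-- the intersected index list is strictly increasing, so sorted() returns it unchanged
theorem pv_pairwise_le {α : Type} (xs : List α) (F : α → Bool) (c : Int → Bool) :
    ((pvIdx xs F).filter c).Pairwise (fun a b : Int => a ≤ b) := by
  have h1 : (pvIdx xs F).Pairwise (· < ·) :=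
    List.Pairwise.sublist (pvIdx_sublist_range xs F) (PySem.List.pairwise_lt_pyRange_one 0 _)
  exact (List.Pairwise.sublist List.filter_sublist h1).imp le_of_lt

-- B's whole pipeline for index lists of the pvIdx form
theorem pv_tail (metrics : List (List (String × String)))
    (F G : List (String × String) → Bool) :
    (PySem.List.sorted (PySem.Set.inter (pvIdx metrics F) (pvIdx metrics G)) (fun i => i) false).map
        (fun i => PySem.List.pyGetD metrics i [])
      = metrics.filter (fun m => F m && G m) := by
  have hint : PySem.Set.inter (pvIdx metrics F) (pvIdx metrics G)
      = (pvIdx metrics F).filter (fun i => (pvIdx metrics G).contains i) := by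
    simp [PySem.Set.inter]
  rw [hint, PySem.List.sorted_eq_self_of_pairwise _ _
    (pv_pairwise_le metrics F (fun i => (pvIdx metrics G).contains i))]
  exact pv_core metrics [] F G

-- ===== VERDICT (by name: the statement is the Claim_ definition above) =====
theorem filter_metrics_py_spec : Claim_equal_filter_metrics_py := by
  intro metrics st su _
  unfold Spec_filter_metrics_py
  rw [filter_metrics_A_eq]
  have hR : PySem.Set.ofList (PySem.List.pyRange 0 (metrics.length : Int) 1)
      = pvIdx metrics (fun _ => true) := by
    rw [pvIdx_true]
    exact PySem.Set.ofList_eq_self_of_nodup _ (PySem.List.nodup_pyRange_one _ _)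
  have hS : PySem.Set.ofList (((PySem.List.enumerate metrics).filter (fun im =>
        PySem.Str.isIn (PySem.Str.lower st) (PySem.Str.lower (pyDictGetD im.2 "name" "")) ||
        PySem.Str.isIn (PySem.Str.lower st) (PySem.Str.lower (pyDictGetD im.2 "description" "")))).map (·.1))
      = pvIdx metrics (fun m => pvHit (PySem.Str.lower st) m) :=
    PySem.Set.ofList_eq_self_of_nodup _
      (pvIdx_nodup metrics (fun m => pvHit (PySem.Str.lower st) m))
  have hU : PySem.Set.ofList (((PySem.List.enumerate metrics).filter (fun im =>
        su.contains (pyDictGetD im.2 "unit" "N/A"))).map (·.1))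
      = pvIdx metrics (fun m => su.contains (pyDictGetD m "unit" "N/A")) :=
    PySem.Set.ofList_eq_self_of_nodup _
      (pvIdx_nodup metrics (fun m => su.contains (pyDictGetD m "unit" "N/A")))
  by_cases h1 : st.isEmpty <;> by_cases h2 : su.isEmpty <;>
    simp only [filter_metrics_py_alt, h1, h2, Bool.not_true, Bool.not_false,
      Bool.false_eq_true, if_true, if_false]
  · rw [hR, pv_tail]
    exact List.filter_congr (fun m _ => by simp [pvKeep, h1, h2])
  · rw [hR, hU, pv_tail]
    exact List.filter_congr (fun m _ => by simp [pvKeep, h1, h2])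
  · rw [hS, hR, pv_tail]
    exact List.filter_congr (fun m _ => by simp [pvKeep, h1, h2])
  · rw [hS, hU, pv_tail]
    exact List.filter_congr (fun m _ => by simp [pvKeep, h1, h2])
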